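-- pv_equiv track=rewrite | github.com/ttyskg/ProgrammingCompetition | AtCoder/ABC/023/b.py | make_accessary
-- ===== SOURCE A (Python) =====
-- def make_accessary(n):
--     s = 'b'
--     i = 0
--     while len(s) < n:
--         i += 1
--         if i % 3 == 1:
--             s = 'a' + s + 'c'
--         elif i % 3 == 2:
--             s = 'c' + s + 'a'
--         else:
--             s = 'b' + s + 'b'
--
--     return s
-- ===== SOURCE B (Python) =====
-- def _left(r):
--     return 'a' if r == 1 else ('c' if r == 2 else 'b')
--
--
-- def _right(r):
--     return 'c' if r == 1 else ('a' if r == 2 else 'b')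
--
--
-- def make_accessary(n):
--     k = n // 2 if n > 1 else 0
--     return ''.join(
--         _left((k - j) % 3) if j < k else ('b' if j == k else _right((j - k) % 3))
--         for j in range(2 * k + 1))
-- ===== Notes on version B (the rewrite author's own statement) =====
-- stated objective: faster
-- what changed: Instead of repeatedly concatenating one layer at a time around the growing string (quadratic copying), B computes the final length directly (k = n//2 layers) and produces each character from its position index in one join.
import Mathlib
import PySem

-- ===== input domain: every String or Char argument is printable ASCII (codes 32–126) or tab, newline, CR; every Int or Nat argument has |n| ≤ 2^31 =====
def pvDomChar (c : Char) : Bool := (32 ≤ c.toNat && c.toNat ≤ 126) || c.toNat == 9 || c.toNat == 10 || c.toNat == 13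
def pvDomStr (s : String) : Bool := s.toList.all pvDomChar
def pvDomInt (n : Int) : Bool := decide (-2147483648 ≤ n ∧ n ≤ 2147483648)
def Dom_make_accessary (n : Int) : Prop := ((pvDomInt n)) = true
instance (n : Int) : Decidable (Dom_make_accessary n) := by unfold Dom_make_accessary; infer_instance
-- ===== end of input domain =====

-- B replaces A's layer-by-layer string concatenation with a direct per-position
-- character formula and a single join (objective: faster, asymptotic).

-- ===== PORT A =====
-- the while loop of A: state (s, i), condition len(s) < n
def pvALoop (n : Int) (s : List Char) (i : Int) : List Char :=
  if (s.length : Int) < n then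
    pvALoop n
      (if PySem.Int.mod (i + 1) 3 = 1 then 'a' :: s ++ ['c']
       else if PySem.Int.mod (i + 1) 3 = 2 then 'c' :: s ++ ['a']
       else 'b' :: s ++ ['b'])
      (i + 1)
  else s
termination_by (n - s.length).toNat
decreasing_by
  rename_i h
  split_ifs <;> simp <;> omega

def make_accessary (n : Int) : String := String.ofList (pvALoop n ['b'] 0)

-- ===== PORT B =====
-- _left(r) of Source B
def pvLeft (r : Nat) : Char := if r = 1 then 'a' else if r = 2 then 'c' else 'b'
-- _right(r) of Source B
def pvRight (r : Nat) : Char := if r = 1 then 'c' else if r = 2 then 'a' else 'b'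

def make_accessary_alt (n : Int) : String :=
  let k : Nat := if 1 < n then (PySem.Int.floordiv n 2).toNat else 0
  String.ofList ((List.range (2 * k + 1)).map (fun j =>
      if j < k then pvLeft ((k - j) % 3)
      else if j = k then 'b'
      else pvRight ((j - k) % 3)))

-- ===== PRECONDITION & SPEC =====
def Spec_make_accessary (n : Int) (out : String) : Prop := out = make_accessary_alt n
instance (n : Int) (out : String) : Decidable (Spec_make_accessary n out) := by unfold Spec_make_accessary; infer_instance

-- ===== CLAIM (what is proved, stated in full; the proofs are below) =====
def Claim_equal_make_accessary : Prop := ∀ (n : Int), Dom_make_accessary n → Spec_make_accessary n (make_accessary n)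

-- ===== LEMMAS AND PROOFS =====

-- the string after i iterations of A's loop
def pvSeq : Nat → List Char
  | 0 => ['b']
  | i + 1 =>
      if (i + 1) % 3 = 1 then 'a' :: pvSeq i ++ ['c']
      else if (i + 1) % 3 = 2 then 'c' :: pvSeq i ++ ['a']
      else 'b' :: pvSeq i ++ ['b']

theorem pvSeq_length (i : Nat) : (pvSeq i).length = 2 * i + 1 := by
  induction i with
  | zero => simp [pvSeq]
  | succ i ih => simp only [pvSeq]; split_ifs <;> simp [ih] <;> omega

-- the number of iterations A performs
def pvK (n : Int) : Nat := if 1 < n then (PySem.Int.floordiv n 2).toNat else 0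

theorem pvK_ge (n : Int) : n ≤ 2 * (pvK n) + 1 := by
  unfold pvK
  split_ifs with h
  · have h2 : PySem.Int.floordiv n 2 = n / 2 :=
      PySem.Int.floordiv_eq_ediv_of_pos (by omega)
    rw [h2]; omega
  · omega

theorem pvK_lt (n : Int) (i : Nat) (h : i < pvK n) : (2 * i + 1 : Int) < n := by
  unfold pvK at h
  split_ifs at h with h1
  · have h2 : PySem.Int.floordiv n 2 = n / 2 :=
      PySem.Int.floordiv_eq_ediv_of_pos (by omega)
    rw [h2] at h; omega
  · omega

theorem pvMod_cast (m : Nat) : PySem.Int.mod (m : Int) 3 = ((m % 3 : Nat) : Int) := by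
  rw [PySem.Int.mod_eq_emod_of_pos (by omega)]; omega

theorem pvALoop_eq (n : Int) : ∀ (t i : Nat), pvK n = i + t →
    pvALoop n (pvSeq i) (i : Int) = pvSeq (pvK n) := by
  intro t
  induction t with
  | zero =>
      intro i hi
      have hc : ¬ (((pvSeq i).length : Int) < n) := by
        have := pvK_ge n
        rw [pvSeq_length]
        push_cast
        omega
      rw [pvALoop.eq_def, if_neg hc]
      have : i = pvK n := by omega
      rw [this]
  | succ t ih =>
      intro i hi
      have hc : (((pvSeq i).length : Int) < n) := by
        have := pvK_lt n i (by omega)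
        rw [pvSeq_length]
        push_cast
        omega
      rw [pvALoop.eq_def, if_pos hc]
      have hcast : ((i : Int) + 1) = ((i + 1 : Nat) : Int) := by push_cast; ring
      have hstep :
          (if PySem.Int.mod ((i : Int) + 1) 3 = 1 then 'a' :: pvSeq i ++ ['c']
           else if PySem.Int.mod ((i : Int) + 1) 3 = 2 then 'c' :: pvSeq i ++ ['a']
           else 'b' :: pvSeq i ++ ['b']) = pvSeq (i + 1) := by
        rw [hcast, pvMod_cast]
        simp only [pvSeq]
        have h3 : (i + 1) % 3 = 0 ∨ (i + 1) % 3 = 1 ∨ (i + 1) % 3 = 2 := by omega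
        rcases h3 with h | h | h <;> simp [h]
      rw [hstep, hcast]
      exact ih (i + 1) (by omega)

-- B's per-position character
def pvF (k j : Nat) : Char :=
  if j < k then pvLeft ((k - j) % 3)
  else if j = k then 'b'
  else pvRight ((j - k) % 3)

theorem pvBList_eq (k : Nat) : (List.range (2 * k + 1)).map (pvF k) = pvSeq k := by
  induction k with
  | zero => simp [pvF, pvSeq, List.range_succ]
  | succ k ih =>
      have hr : 2 * (k + 1) + 1 = (2 * k + 2) + 1 := by omega
      rw [hr, List.range_succ_eq_map, List.range_succ]
      simp only [List.map_cons, List.map_map, List.map_append, List.map_cons,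
        List.map_nil]
      have h0 : pvF (k + 1) 0 = pvLeft ((k + 1) % 3) := by
        simp [pvF]
      have hlast : pvF (k + 1) (Nat.succ (2 * k + 1)) = pvRight ((k + 1) % 3) := by
        have h1 : ¬ Nat.succ (2 * k + 1) < k + 1 := by omega
        have h2 : ¬ Nat.succ (2 * k + 1) = k + 1 := by omega
        have h3 : Nat.succ (2 * k + 1) - (k + 1) = k + 1 := by omega
        unfold pvF
        rw [if_neg h1, if_neg h2, h3]
      have hmid : (List.range (2 * k + 1)).map (pvF (k + 1) ∘ Nat.succ)
          = (List.range (2 * k + 1)).map (pvF k) := by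
        apply List.map_congr_left
        intro j hj
        have hj' : j < 2 * k + 1 := List.mem_range.mp hj
        simp only [Function.comp]
        unfold pvF
        rcases Nat.lt_trichotomy j k with h | h | h
        · have e1 : Nat.succ j < k + 1 := by omega
          have e2 : k + 1 - Nat.succ j = k - j := by omega
          simp [e1, h, e2]
        · have e1 : ¬ Nat.succ j < k + 1 := by omega
          have e2 : Nat.succ j = k + 1 := by omega
          simp [h]
        · have e1 : ¬ Nat.succ j < k + 1 := by omega
          have e2 : ¬ Nat.succ j = k + 1 := by omega
          have e3 : ¬ j < k := by omega
          have e4 : ¬ j = k := by omega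
          have e5 : Nat.succ j - (k + 1) = j - k := by omega
          simp [e1, e3, e4, e5]
      rw [hmid, ih, h0, hlast]
      show pvLeft ((k + 1) % 3) :: (pvSeq k ++ [pvRight ((k + 1) % 3)]) = pvSeq (k + 1)
      conv_rhs => rw [pvSeq]
      have h3 : (k + 1) % 3 = 0 ∨ (k + 1) % 3 = 1 ∨ (k + 1) % 3 = 2 := by omega
      rcases h3 with h | h | h <;> simp [h, pvLeft, pvRight]

-- ===== VERDICT (by name: the statement is the Claim_ definition above) =====
theorem make_accessary_spec : Claim_equal_make_accessary := by
  intro n _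
  unfold Spec_make_accessary make_accessary make_accessary_alt
  have hA : pvALoop n ['b'] 0 = pvSeq (pvK n) := by
    have := pvALoop_eq n (pvK n) 0 (by omega)
    simpa [pvSeq] using this
  have hB : (List.range (2 * pvK n + 1)).map (pvF (pvK n)) = pvSeq (pvK n) :=
    pvBList_eq (pvK n)
  rw [hA, ← hB]
  rfl
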